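-- pv_equiv track=rewrite | github.com/time4ruin/kjh | arm/kj05_find_colliding_address/analyze.py | gf2_rref
-- ===== SOURCE A (Python) =====
-- def gf2_rref(M):
--     if not M:
--         return []
--     A = [row[:] for row in M]
--     n_rows, n_cols = len(A), len(A[0])
--     r = c = 0
--     while r < n_rows and c < n_cols:
--         piv = None
--         for i in range(r, n_rows):
--             if A[i][c] == 1:
--                 piv = i
--                 break
--         if piv is None:
--             c += 1
--             continue
--         A[r], A[piv] = A[piv], A[r]
--         for i in range(n_rows):
--             if i != r and A[i][c] == 1:
--                 A[i] = [(a ^ b) for a, b in zip(A[i], A[r])]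
--         r += 1
--         c += 1
--     return A
-- ===== SOURCE B (Python) =====
-- # B (alternative decomposition): no index arithmetic and no in-place writes.
-- # Rows live in two zones, 'done' (finished pivot rows) and 'active'; each column
-- # sweep picks the first active row with a 1, moves it to the end of 'done' by
-- # list surgery (the old active head takes its slot), and rebuilds both zones
-- # with a comprehension that clears the column.
--
-- def gf2_rref(M):
--     if not M:
--         return []
--     n_cols = len(M[0])
--     done, active = [], [list(row) for row in M]
--     for c in range(n_cols):
--         j = None
--         for k, row in enumerate(active):
--             if row[c] == 1:
--                 j = k
--                 break
--         if j is None: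
--             continue
--         piv = active[j]
--         head, tail = active[0], active[1:]
--         rest = tail if j == 0 else tail[:j - 1] + [head] + tail[j:]
--
--         def clear(row):
--             return [a ^ b for a, b in zip(row, piv)] if row[c] == 1 else row
--
--         done = [clear(row) for row in done] + [piv]
--         active = [clear(row) for row in rest]
--     return done + active
-- ===== Notes on version B (the rewrite author's own statement) =====
-- stated objective: alternative
-- what changed: B replaces A's single mutable array with index arithmetic (in-place swap of rows r and piv, guarded index loop rewriting A[i]) by an immutable two-zone decomposition: finished pivot rows and active rows are kept in separate lists, the pivot is moved between zones by list surgery, and each column sweep rebuilds both zones with comprehensions; Pre_ excludes ragged matrices with a row shorter than the first row, on which A's column reads can raise IndexError.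
-- outside the precondition, e.g. on gf2_rref([[0, 5], [1]]): A returns [[1], [0, 5]], B returns [[1], [0, 5]]; on gf2_rref([[1, 0], [1]]): A raises IndexError, B raises IndexError
import Mathlib
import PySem

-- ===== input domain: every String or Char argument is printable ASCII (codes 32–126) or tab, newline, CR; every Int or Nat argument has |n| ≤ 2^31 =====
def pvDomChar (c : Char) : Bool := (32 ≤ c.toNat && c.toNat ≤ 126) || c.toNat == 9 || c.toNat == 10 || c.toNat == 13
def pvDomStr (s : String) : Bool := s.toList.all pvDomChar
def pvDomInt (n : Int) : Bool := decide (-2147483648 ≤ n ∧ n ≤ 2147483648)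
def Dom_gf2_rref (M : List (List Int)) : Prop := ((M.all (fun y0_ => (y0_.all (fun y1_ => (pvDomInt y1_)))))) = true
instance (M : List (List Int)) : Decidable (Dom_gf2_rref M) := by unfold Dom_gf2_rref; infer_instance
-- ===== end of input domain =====

-- B replaces A's single mutable array with index arithmetic (swap of rows r/piv,
-- guarded index loop rewriting A[i]) by an immutable two-zone decomposition:
-- finished and active rows live in separate lists, the pivot migrates between the
-- zones by list surgery, and each column sweep rebuilds the zones by mapping
-- (objective: alternative decomposition; same cost).

-- ===== PORT A =====
-- [(a ^ b) for a, b in zip(A[i], A[r])]  (PySem.Int.bxor is Python's int ^; zip truncates)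
def xorRowA (a b : List Int) : List Int := (a.zip b).map (fun p => PySem.Int.bxor p.1 p.2)

-- 'for i in range(r, n_rows): if A[i][c] == 1: piv = i; break' — fuel = n_rows - i counts
-- the remaining iterations; list indexing is total getD (Pre_ keeps every index in range)
def findPivA : Nat → List (List Int) → Nat → Nat → Option Nat
  | 0, _, _, _ => none
  | fuel+1, rows, c, i =>
    if (rows.getD i []).getD c 0 = 1 then some i else findPivA fuel rows c (i+1)

-- 'for i in range(n_rows): if i != r and A[i][c] == 1: A[i] = xorRow …' — fuel = n_rows - i
def elimA : Nat → List (List Int) → Nat → Nat → List Int → Nat → List (List Int)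
  | 0, rows, _, _, _, _ => rows
  | fuel+1, rows, r, c, prow, i =>
    elimA fuel
      (if i ≠ r ∧ (rows.getD i []).getD c 0 = 1
       then rows.set i (xorRowA (rows.getD i []) prow) else rows)
      r c prow (i+1)

-- the while loop: c grows by 1 every iteration, so n_cols iterations suffice; fuel is
-- only a termination device and never cuts the loop short
def loopA : Nat → List (List Int) → Nat → Nat → Nat → Nat → List (List Int)
  | 0, rows, _, _, _, _ => rows
  | fuel+1, rows, r, c, n, m =>
    if r < n ∧ c < m then
      match findPivA (n - r) rows c r with
      | none => loopA fuel rows r (c+1) n m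
      | some piv =>
        let rows1 := (rows.set r (rows.getD piv [])).set piv (rows.getD r [])
        let rows2 := elimA n rows1 r c (rows1.getD r []) 0
        loopA fuel rows2 (r+1) (c+1) n m
    else rows

def gf2_rref (M : List (List Int)) : List (List Int) :=
  if M = [] then []
  else loopA (M.headD []).length M 0 0 M.length (M.headD []).length

-- ===== PORT B =====
-- [a ^ b for a, b in zip(row, piv)]
def zipxorB (a b : List Int) : List Int := (a.zip b).map (fun p => PySem.Int.bxor p.1 p.2)

-- clear(row) = xored row if row[c] == 1 else row
def clearRow (c : Nat) (piv row : List Int) : List Int :=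
  if row.getD c 0 = 1 then zipxorB row piv else row

-- 'for k, row in enumerate(active): if row[c] == 1: j = k; break'
def findJB : List (List Int) → Nat → Nat → Option Nat
  | [], _, _ => none
  | row :: rest, c, k => if row.getD c 0 = 1 then some k else findJB rest c (k+1)

-- one column sweep: pick the pivot, do the list surgery, rebuild both zones
def stepB (done active : List (List Int)) (c : Nat) :
    List (List Int) × List (List Int) :=
  match findJB active c 0 with
  | none => (done, active)
  | some j =>
    let piv := active.getD j []
    let head := active.getD 0 []
    let tail := active.drop 1
    let rest := if j = 0 then tail else tail.take (j-1) ++ [head] ++ tail.drop j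
    (done.map (clearRow c piv) ++ [piv], rest.map (clearRow c piv))

-- 'for c in range(n_cols)': the fuel counts exactly the n_cols iterations
def loopBc : Nat → List (List Int) → List (List Int) → Nat →
    List (List Int) × List (List Int)
  | 0, done, active, _ => (done, active)
  | fuel+1, done, active, c =>
    let s := stepB done active c
    loopBc fuel s.1 s.2 (c+1)

def gf2_rref_alt (M : List (List Int)) : List (List Int) :=
  if M = [] then []
  else
    let s := loopBc (M.headD []).length [] M 0
    s.1 ++ s.2

-- ===== PRECONDITION & SPEC =====
-- Pre_ excludes ragged matrices with a row shorter than the first row: on those A's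
-- column reads can raise IndexError.  On the excluded inputs where an early end of the
-- scan lets A return anyway, B performs the same row operations and returns the same
-- value, so nothing is lost in substance.
def Pre_gf2_rref (M : List (List Int)) : Prop :=
  ∀ row ∈ M, (M.headD []).length ≤ row.length
instance (M : List (List Int)) : Decidable (Pre_gf2_rref M) := by unfold Pre_gf2_rref; infer_instance
def pvWitness_gf2_rref : List (List Int) := [[1, 0, 1], [0, 1, 1], [1, 1, 0]]

def Spec_gf2_rref (M : List (List Int)) (out : List (List Int)) : Prop := out = gf2_rref_alt M
instance (M : List (List Int)) (out : List (List Int)) : Decidable (Spec_gf2_rref M out) := by unfold Spec_gf2_rref; infer_instance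

-- ===== CLAIM (what is proved, stated in full; the proofs are below) =====
def Claim_equal_gf2_rref : Prop := ∀ (M : List (List Int)), Dom_gf2_rref M → Pre_gf2_rref M → Spec_gf2_rref M (gf2_rref M)

-- ===== LEMMAS AND PROOFS =====

-- pivot search: findJB with a start offset is an offset of findJB from 0
theorem findJB_off (c : Nat) : ∀ (active : List (List Int)) (k : Nat),
    findJB active c k = (findJB active c 0).map (· + k) := by
  intro active
  induction active with
  | nil => intro k; rfl
  | cons row rest ih =>
    intro k
    simp only [findJB]
    by_cases h : row.getD c 0 = 1
    · rw [if_pos h, if_pos h]; simp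
    · rw [if_neg h, if_neg h, ih (k+1), ih 1]
      cases findJB rest c 0 <;> simp <;> omega

theorem findJB_lt (c : Nat) : ∀ (active : List (List Int)) (j : Nat),
    findJB active c 0 = some j → j < active.length := by
  intro active
  induction active with
  | nil => intro j h; simp [findJB] at h
  | cons row rest ih =>
    intro j h
    simp only [findJB] at h
    by_cases ht : row.getD c 0 = 1
    · rw [if_pos ht] at h; cases h; simp
    · rw [if_neg ht, findJB_off c rest 1] at h
      cases hj : findJB rest c 0 with
      | none => rw [hj] at h; cases h
      | some j0 =>
        rw [hj] at h
        simp at h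
        have := ih j0 hj
        simp
        omega

-- A's pivot scan over positions pre.length… is B's scan of the active zone
theorem getD_append_off (done : List (List Int)) : ∀ (active : List (List Int)) (j : Nat),
    (done ++ active).getD (done.length + j) [] = active.getD j [] := by
  intro active j
  rcases Nat.lt_or_ge j active.length with h | h
  · rw [List.getD_eq_getElem _ _ (by simp; omega), List.getD_eq_getElem _ _ h,
        List.getElem_append_right (by omega)]
    congr 1
    omega
  · rw [List.getD_eq_default _ _ (by simp; omega), List.getD_eq_default _ _ h]

theorem findA_sim (c : Nat) : ∀ (active pre : List (List Int)),
    findPivA active.length (pre ++ active) c pre.length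
      = (findJB active c 0).map (· + pre.length) := by
  intro active
  induction active with
  | nil => intro pre; rfl
  | cons row rest ih =>
    intro pre
    simp only [List.length_cons, findPivA, findJB]
    have hget : (pre ++ row :: rest).getD pre.length [] = row := by
      have := getD_append_off pre (row :: rest) 0
      simpa using this
    rw [hget]
    by_cases h : row.getD c 0 = 1
    · rw [if_pos h, if_pos h]; simp
    · rw [if_neg h, if_neg h]
      have hassoc : pre ++ row :: rest = (pre ++ [row]) ++ rest := by simp
      have hlen : pre.length + 1 = (pre ++ [row]).length := by simp
      rw [hassoc, hlen, ih (pre ++ [row]), findJB_off c rest 1]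
      cases findJB rest c 0 <;> simp <;> omega

-- the elimination sweep, characterised positionally
def gElim (r c : Nat) (prow : List Int) : List (List Int) → Nat → List (List Int)
  | [], _ => []
  | row :: rest, i =>
    (if i ≠ r ∧ row.getD c 0 = 1 then xorRowA row prow else row)
      :: gElim r c prow rest (i+1)

theorem elimA_eq_gElim (r c : Nat) (prow : List Int) :
    ∀ (fuel : Nat) (rows : List (List Int)) (i : Nat), rows.length ≤ fuel + i →
    elimA fuel rows r c prow i = rows.take i ++ gElim r c prow (rows.drop i) i := by
  intro fuel
  induction fuel with
  | zero =>
    intro rows i h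
    rw [List.take_of_length_le (by omega), List.drop_eq_nil_of_le (by omega)]
    simp [elimA, gElim]
  | succ fuel ih =>
    intro rows i h
    simp only [elimA]
    rcases Nat.lt_or_ge i rows.length with hi | hi
    · have hdrop : rows.drop i = rows[i] :: rows.drop (i+1) := List.drop_eq_getElem_cons hi
      have hgetD : rows.getD i [] = rows[i] := List.getD_eq_getElem rows [] hi
      have htake : rows.take (i+1) = rows.take i ++ [rows[i]] := by
        rw [List.take_succ, List.getElem?_eq_getElem hi]
        rfl
      by_cases hc : i ≠ r ∧ (rows.getD i []).getD c 0 = 1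
      · rw [if_pos hc, ih _ (i+1) (by simp; omega)]
        have hset : rows.set i (xorRowA (rows.getD i []) prow)
            = rows.take i ++ xorRowA (rows.getD i []) prow :: rows.drop (i+1) := by
          rw [List.set_eq_take_append_cons_drop, if_pos hi]
        rw [hset]
        have hlen : (rows.take i).length = i := by simp; omega
        rw [List.take_append, List.drop_append, hlen]
        rw [List.take_of_length_le (l := rows.take i) (by omega),
            List.drop_eq_nil_of_le (as := rows.take i) (by omega)]
        simp only [List.nil_append, show i + 1 - i = 1 from by omega,
          List.take_succ_cons, List.take_zero, List.drop_succ_cons, List.drop_zero]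
        rw [hdrop]
        simp only [gElim, if_pos (show i ≠ r ∧ (rows[i] : List Int).getD c 0 = 1 from by
          rwa [hgetD] at hc)]
        rw [hgetD, List.append_assoc]
        rfl
      · rw [if_neg hc, ih rows (i+1) (by omega), hdrop]
        simp only [gElim, if_neg (show ¬(i ≠ r ∧ (rows[i] : List Int).getD c 0 = 1) from by
          rwa [hgetD] at hc)]
        rw [htake, List.append_assoc]
        rfl
    · have hcond : ¬(i ≠ r ∧ (rows.getD i []).getD c 0 = 1) := by
        rw [List.getD_eq_default rows [] hi]
        simp
      rw [if_neg hcond, ih rows (i+1) (by omega),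
          List.take_of_length_le (by omega), List.take_of_length_le (by omega),
          List.drop_eq_nil_of_le (by omega), List.drop_eq_nil_of_le (by omega)]
      simp [gElim]

theorem gElim_append (r c : Nat) (prow : List Int) :
    ∀ (xs ys : List (List Int)) (i : Nat),
    gElim r c prow (xs ++ ys) i = gElim r c prow xs i ++ gElim r c prow ys (i + xs.length) := by
  intro xs
  induction xs with
  | nil => intro ys i; simp [gElim]
  | cons x xs ih =>
    intro ys i
    simp only [List.cons_append, gElim, List.length_cons, ih ys (i+1)]
    rw [show i + 1 + xs.length = i + (xs.length + 1) from by omega]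

theorem gElim_map_ne (r c : Nat) (prow : List Int) :
    ∀ (xs : List (List Int)) (i : Nat), (∀ k, k < xs.length → i + k ≠ r) →
    gElim r c prow xs i = xs.map (clearRow c prow) := by
  intro xs
  induction xs with
  | nil => intro i _; rfl
  | cons x xs ih =>
    intro i hne
    have h0 : i ≠ r := by have := hne 0 (by simp); omega
    simp only [gElim, List.map_cons]
    rw [ih (i+1) (fun k hk => by have := hne (k+1) (by simp; omega); omega)]
    congr 1
    unfold clearRow
    by_cases ht : x.getD c 0 = 1
    · rw [if_pos ⟨h0, ht⟩, if_pos ht]; rfl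
    · rw [if_neg (by tauto), if_neg ht]

theorem gElim_split (r c : Nat) (prow : List Int) (done rest : List (List Int))
    (piv : List Int) (hr : done.length = r) :
    gElim r c prow (done ++ piv :: rest) 0
      = done.map (clearRow c prow) ++ piv :: rest.map (clearRow c prow) := by
  rw [gElim_append, gElim_map_ne r c prow done 0 (fun k hk => by omega)]
  congr 1
  simp only [Nat.zero_add, hr, gElim, if_neg (by simp : ¬(r ≠ r ∧ (piv.getD c 0 = 1)))]
  rw [gElim_map_ne r c prow rest (r+1) (fun k hk => by omega)]

-- set inside the concatenation, and the surgery as a set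
theorem set_append_off (done : List (List Int)) (active : List (List Int)) (k : Nat)
    (v : List Int) : (done ++ active).set (done.length + k) v = done ++ active.set k v := by
  rw [List.set_append]
  rw [if_neg (by omega)]
  rw [show done.length + k - done.length = k from by omega]

theorem surgery_eq_set (tail : List (List Int)) (head : List Int) (j : Nat)
    (hj : j ≠ 0) (hjl : j - 1 < tail.length) :
    tail.take (j-1) ++ [head] ++ tail.drop j = tail.set (j-1) head := by
  rw [List.set_eq_take_append_cons_drop, if_pos hjl, show j - 1 + 1 = j from by omega]
  simp

-- the active zone never refills: once empty B's loop is a no-op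
theorem loopBc_stall : ∀ (fuel : Nat) (done : List (List Int)) (c : Nat),
    loopBc fuel done [] c = (done, []) := by
  intro fuel
  induction fuel with
  | zero => intro done c; rfl
  | succ fuel ih =>
    intro done c
    simp only [loopBc, stepB, findJB]
    exact ih done (c+1)

theorem loop_sim (L : Nat) : ∀ (fuel : Nat) (done active : List (List Int)) (c : Nat),
    fuel + c ≤ L →
    loopA fuel (done ++ active) done.length c (done.length + active.length) L
      = (loopBc fuel done active c).1 ++ (loopBc fuel done active c).2 := by
  intro fuel
  induction fuel with
  | zero => intro done active c _; rfl
  | succ fuel ih =>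
    intro done active c hfc
    by_cases hact : active = []
    · subst hact
      simp only [loopA, loopBc_stall]
      rw [if_neg (by simp)]
    · have hal : 0 < active.length := List.length_pos_iff.mpr hact
      simp only [loopA, loopBc]
      rw [if_pos ⟨by omega, by omega⟩,
          show done.length + active.length - done.length = active.length from by omega,
          findA_sim c active done]
      simp only [stepB]
      cases hj : findJB active c 0 with
      | none =>
        simp only [Option.map_none]
        exact ih done active (c+1) (by omega)
      | some j =>
        simp only [Option.map_some]
        have hjl : j < active.length := findJB_lt c active j hj
        obtain ⟨head, tail, rfl⟩ := List.exists_cons_of_ne_nil hact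
        -- the pivot value and the swapped array
        have hpiv : (done ++ head :: tail).getD (j + done.length) []
            = (head :: tail).getD j [] := by
          rw [show j + done.length = done.length + j from by omega]
          exact getD_append_off done (head :: tail) j
        have hhead : (done ++ head :: tail).getD done.length [] = head := by
          have := getD_append_off done (head :: tail) 0
          simpa using this
        set piv := (head :: tail).getD j [] with hpivdef
        have hswap : ((done ++ head :: tail).set done.length
              ((done ++ head :: tail).getD (j + done.length) [])).set (j + done.length)
              ((done ++ head :: tail).getD done.length [])
            = done ++ piv :: (if j = 0 then tail
                else tail.take (j-1) ++ [head] ++ tail.drop j) := by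
          rw [hpiv, hhead,
              show ((done ++ head :: tail).set done.length piv)
                = done ++ (head :: tail).set 0 piv from by
                  have := set_append_off done (head :: tail) 0 piv
                  simpa using this,
              show j + done.length = done.length + j from by omega,
              set_append_off done _ j]
          by_cases hj0 : j = 0
          · subst hj0
            simp [hpivdef]
          · obtain ⟨j', rfl⟩ : ∃ j', j = j' + 1 := ⟨j - 1, by omega⟩
            rw [surgery_eq_set tail head (j'+1) (by omega) (by simp at hjl ⊢; omega)]
            simp
        rw [hswap]
        set rest := (if j = 0 then tail else tail.take (j-1) ++ [head] ++ tail.drop j)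
          with hrest
        have hprow : (done ++ piv :: rest).getD done.length [] = piv := by
          have := getD_append_off done (piv :: rest) 0
          simpa using this
        rw [hprow]
        have hrl : rest.length = tail.length := by
          rw [hrest]
          split_ifs with h0
          · rfl
          · simp
            simp at hjl
            omega
        have hn : done.length + (head :: tail).length = (done ++ piv :: rest).length := by
          simp [hrl]
        have helim : elimA (done.length + (head :: tail).length) (done ++ piv :: rest)
              done.length c piv 0
            = (done.map (clearRow c piv) ++ [piv]) ++ rest.map (clearRow c piv) := by
          rw [elimA_eq_gElim done.length c piv _ (done ++ piv :: rest) 0 (by omega)]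
          simp only [List.take_zero, List.drop_zero, List.nil_append]
          rw [gElim_split done.length c piv done rest piv rfl]
          simp
        rw [helim]
        have hlen1 : done.length + 1 = (done.map (clearRow c piv) ++ [piv]).length := by
          simp
        have hlen2 : done.length + (head :: tail).length
            = (done.map (clearRow c piv) ++ [piv]).length
              + (rest.map (clearRow c piv)).length := by
          simp [hrl]
          omega
        rw [hlen1, hlen2]
        exact ih (done.map (clearRow c piv) ++ [piv]) (rest.map (clearRow c piv))
          (c+1) (by omega)

-- ===== VERDICT (by name: the statement is the Claim_ definition above) =====
theorem gf2_rref_spec : Claim_equal_gf2_rref := by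
  intro M _hD _hP
  unfold Spec_gf2_rref gf2_rref gf2_rref_alt
  by_cases hM0 : M = []
  · rw [if_pos hM0, if_pos hM0]
  · rw [if_neg hM0, if_neg hM0]
    have h := loop_sim (M.headD []).length (M.headD []).length [] M 0 (by omega)
    simpa using h
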